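-- pv_equiv track=rewrite | github.com/BingoKnight/CIS421StoreApp | users/views.py | user_select_query_builder
-- ===== SOURCE A (Python) =====
-- def user_select_query_builder(validated_dict):
--     query = 'SELECT * FROM users_user WHERE '
--
--     first_itr = True
--     for key, value in validated_dict.items():
--         if first_itr and key != 'csrfmiddlewaretoken':
--             if isinstance(value, int):
--                 query += key + ' LIKE "%' + str(value) + '%"'
--             else:
--                 query += key + ' LIKE "%' + value.lower().strip() + '%"'
--             first_itr = False
--         elif key != 'csrfmiddlewaretoken':
--             if isinstance(value, int):
--                 query += ' AND ' + key + ' LIKE "%' + str(value) + '%"'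
--             else:
--                 query += ' AND ' + key + ' LIKE "%' + value.lower().strip() + '%"'
--
--     query += ';'
--
--     return query
-- ===== SOURCE B (Python) =====
-- def user_select_query_builder(validated_dict):
--     def build(items):
--         # divide and conquer: combine the WHERE bodies of the two halves
--         if not items:
--             return ''
--         if len(items) == 1:
--             key, value = items[0]
--             if key == 'csrfmiddlewaretoken':
--                 return ''
--             text = str(value) if isinstance(value, int) else value.lower().strip()
--             return key + ' LIKE "%' + text + '%"'
--         mid = len(items) // 2
--         left = build(items[:mid])
--         right = build(items[mid:])
--         if left == '':
--             return right
--         if right == '':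
--             return left
--         return left + ' AND ' + right
--     return 'SELECT * FROM users_user WHERE ' + build(list(validated_dict.items())) + ';'
-- ===== Notes on version B (the rewrite author's own statement) =====
-- stated objective: alternative
-- what changed: Replaces A's forward loop with a first_itr flag and conditional ' AND ' prefixing by a balanced divide-and-conquer: split the item list in half, recursively build each half's WHERE body, and combine the halves with ' AND ' only when both are nonempty (correct because joining clauses with ' AND ' is associative with '' as identity).
import Mathlib
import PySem

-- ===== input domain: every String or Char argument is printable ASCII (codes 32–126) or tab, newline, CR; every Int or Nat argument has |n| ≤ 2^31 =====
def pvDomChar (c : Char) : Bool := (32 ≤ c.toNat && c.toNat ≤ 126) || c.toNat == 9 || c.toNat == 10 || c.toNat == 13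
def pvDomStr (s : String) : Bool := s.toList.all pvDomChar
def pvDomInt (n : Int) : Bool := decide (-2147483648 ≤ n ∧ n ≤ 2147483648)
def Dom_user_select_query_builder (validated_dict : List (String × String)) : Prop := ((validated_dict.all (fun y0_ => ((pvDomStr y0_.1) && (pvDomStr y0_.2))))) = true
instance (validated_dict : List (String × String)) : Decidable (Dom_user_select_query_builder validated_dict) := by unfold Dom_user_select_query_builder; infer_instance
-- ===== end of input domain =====

-- B replaces A's forward loop with a first_itr flag by a balanced divide-and-conquer that
-- builds each half's WHERE body and combines them with ' AND ' when both are nonempty (alternative).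
-- Values are Strings under the type convention, so Python's `isinstance(value, int)` is always
-- False: only the else branch of the formatting is ported in both programs.

-- ===== PORT A =====
def user_select_query_builder (validated_dict : List (String × String)) : String :=
  let r := validated_dict.foldl
    (fun (st : String × Bool) kv =>
      if st.2 && (kv.1 != "csrfmiddlewaretoken") then
        (st.1 ++ kv.1 ++ " LIKE \"%" ++ PySem.Str.strip (PySem.Str.lower kv.2) ++ "%\"", false)
      else if kv.1 != "csrfmiddlewaretoken" then
        (st.1 ++ " AND " ++ kv.1 ++ " LIKE \"%" ++ PySem.Str.strip (PySem.Str.lower kv.2) ++ "%\"", st.2)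
      else st)
    ("SELECT * FROM users_user WHERE ", true)
  r.1 ++ ";"

-- ===== PORT B =====
-- recursive helper `build` of Source B: divide and conquer on the item list
def pvBuild : List (String × String) → String
  | [] => ""
  | [kv] =>
      if kv.1 == "csrfmiddlewaretoken" then ""
      else kv.1 ++ " LIKE \"%" ++ PySem.Str.strip (PySem.Str.lower kv.2) ++ "%\""
  | a :: b :: tl =>
      let l := a :: b :: tl
      let left := pvBuild (l.take (l.length / 2))
      let right := pvBuild (l.drop (l.length / 2))
      if left == "" then right
      else if right == "" then left
      else left ++ " AND " ++ right
termination_by l => l.length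
decreasing_by
  · simp [List.length_take]; omega
  · simp; omega

def user_select_query_builder_alt (validated_dict : List (String × String)) : String :=
  "SELECT * FROM users_user WHERE " ++ pvBuild validated_dict ++ ";"

-- ===== PRECONDITION & SPEC =====
def Spec_user_select_query_builder (validated_dict : List (String × String)) (out : String) : Prop := out = user_select_query_builder_alt validated_dict
instance (validated_dict : List (String × String)) (out : String) : Decidable (Spec_user_select_query_builder validated_dict out) := by unfold Spec_user_select_query_builder; infer_instance

-- ===== CLAIM (what is proved, stated in full; the proofs are below) =====
def Claim_equal_user_select_query_builder : Prop := ∀ (validated_dict : List (String × String)), Dom_user_select_query_builder validated_dict → Spec_user_select_query_builder validated_dict (user_select_query_builder validated_dict)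

-- ===== LEMMAS AND PROOFS =====

-- A's loop body, named for the lemmas
def pvStepA (st : String × Bool) (kv : String × String) : String × Bool :=
  if st.2 && (kv.1 != "csrfmiddlewaretoken") then
    (st.1 ++ kv.1 ++ " LIKE \"%" ++ PySem.Str.strip (PySem.Str.lower kv.2) ++ "%\"", false)
  else if kv.1 != "csrfmiddlewaretoken" then
    (st.1 ++ " AND " ++ kv.1 ++ " LIKE \"%" ++ PySem.Str.strip (PySem.Str.lower kv.2) ++ "%\"", st.2)
  else st

-- linear-recursion characterisation of the WHERE body (proof device)
def pvJ : List (String × String) → String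
  | [] => ""
  | kv :: tl =>
    let rest := pvJ tl
    if kv.1 == "csrfmiddlewaretoken" then rest
    else
      let clause := kv.1 ++ " LIKE \"%" ++ PySem.Str.strip (PySem.Str.lower kv.2) ++ "%\""
      if rest == "" then clause else clause ++ " AND " ++ rest

-- the clause built for one kept pair
def pvC (kv : String × String) : String :=
  kv.1 ++ " LIKE \"%" ++ PySem.Str.strip (PySem.Str.lower kv.2) ++ "%\""

-- the combine step of pvBuild
def pvCombine (x y : String) : String :=
  if x == "" then y else if y == "" then x else x ++ " AND " ++ y

theorem pvAppend_ne_empty_left {x : String} (y : String) (h : x ≠ "") : x ++ y ≠ "" := by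
  intro hc
  apply h
  have := congrArg String.toList hc
  simp [String.toList_append] at this
  exact String.toList_inj.mp (by simp [this.1])

theorem pvC_ne_empty (kv : String × String) : pvC kv ≠ "" := by
  intro hc
  have := congrArg String.toList hc
  simp [pvC, String.toList_append] at this

theorem pvJ_cons_skip (kv : String × String) (tl : List (String × String))
    (h : kv.1 = "csrfmiddlewaretoken") : pvJ (kv :: tl) = pvJ tl := by
  simp [pvJ, h]

theorem pvJ_cons_keep (kv : String × String) (tl : List (String × String))
    (h : ¬ kv.1 = "csrfmiddlewaretoken") :
    pvJ (kv :: tl) = if pvJ tl = "" then pvC kv else pvC kv ++ " AND " ++ pvJ tl := by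
  simp [pvJ, pvC, h]

theorem pvJ_append (a b : List (String × String)) :
    pvJ (a ++ b) = pvCombine (pvJ a) (pvJ b) := by
  induction a with
  | nil => simp [pvJ, pvCombine]
  | cons kv tl ih =>
      by_cases h : kv.1 = "csrfmiddlewaretoken"
      · rw [List.cons_append, pvJ_cons_skip _ _ h, pvJ_cons_skip _ _ h, ih]
      · rw [List.cons_append, pvJ_cons_keep _ _ h, pvJ_cons_keep _ _ h, ih]
        have hC := pvC_ne_empty kv
        by_cases ht : pvJ tl = ""
        · by_cases hb : pvJ b = "" <;> simp [pvCombine, ht, hb, hC]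
        · have h2 : pvC kv ++ " AND " ++ pvJ tl ≠ "" :=
            pvAppend_ne_empty_left _ (pvAppend_ne_empty_left _ hC)
          by_cases hb : pvJ b = ""
          · simp [pvCombine, ht, hb, h2]
          · simp [pvCombine, ht, hb, String.append_assoc]

theorem pvBuild_eq_pvJ (l : List (String × String)) : pvBuild l = pvJ l := by
  match l with
  | [] => simp [pvBuild, pvJ]
  | [kv] =>
      by_cases h : kv.1 = "csrfmiddlewaretoken"
      · simp [pvBuild, pvJ, h]
      · simp [pvBuild, pvJ, h]
  | a :: b :: tl =>
      have hb : pvBuild (a :: b :: tl) =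
          pvCombine (pvBuild ((a :: b :: tl).take ((a :: b :: tl).length / 2)))
            (pvBuild ((a :: b :: tl).drop ((a :: b :: tl).length / 2))) := by
        rw [pvBuild]
        simp only [pvCombine]
      have ih1 := pvBuild_eq_pvJ ((a :: b :: tl).take ((a :: b :: tl).length / 2))
      have ih2 := pvBuild_eq_pvJ ((a :: b :: tl).drop ((a :: b :: tl).length / 2))
      rw [hb, ih1, ih2, ← pvJ_append, List.take_append_drop]
termination_by l.length
decreasing_by
  · simp [List.length_take]; omega
  · simp; omega

theorem pvFold_false (l : List (String × String)) :
    ∀ acc : String,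
      l.foldl pvStepA (acc, false) =
        (acc ++ (if pvJ l = "" then "" else " AND " ++ pvJ l), false) := by
  induction l with
  | nil => intro acc; simp [pvJ]
  | cons kv tl ih =>
      intro acc
      by_cases h : kv.1 = "csrfmiddlewaretoken"
      · have e : pvStepA (acc, false) kv = (acc, false) := by simp [pvStepA, h]
        rw [List.foldl_cons, e, ih, pvJ_cons_skip _ _ h]
      · have e : pvStepA (acc, false) kv = (acc ++ " AND " ++ pvC kv, false) := by
          simp [pvStepA, pvC, h, String.append_assoc]
        rw [List.foldl_cons, e, ih, pvJ_cons_keep _ _ h]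
        have hC := pvC_ne_empty kv
        by_cases ht : pvJ tl = ""
        · simp [ht, hC, String.append_assoc]
        · simp [ht, String.append_assoc]

theorem pvFold_true (l : List (String × String)) :
    ∀ acc : String,
      (l.foldl pvStepA (acc, true)).1 = acc ++ pvJ l := by
  induction l with
  | nil => intro acc; simp [pvJ]
  | cons kv tl ih =>
      intro acc
      by_cases h : kv.1 = "csrfmiddlewaretoken"
      · have e : pvStepA (acc, true) kv = (acc, true) := by simp [pvStepA, h]
        rw [List.foldl_cons, e, ih, pvJ_cons_skip _ _ h]
      · have e : pvStepA (acc, true) kv = (acc ++ pvC kv, false) := by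
          simp [pvStepA, pvC, h, String.append_assoc]
        rw [List.foldl_cons, e, pvFold_false, pvJ_cons_keep _ _ h]
        by_cases ht : pvJ tl = ""
        · simp [ht]
        · simp [ht, String.append_assoc]

-- ===== VERDICT (by name: the statement is the Claim_ definition above) =====
theorem user_select_query_builder_spec : Claim_equal_user_select_query_builder := by
  intro vd _
  simp only [Spec_user_select_query_builder, user_select_query_builder,
    user_select_query_builder_alt]
  show (vd.foldl pvStepA ("SELECT * FROM users_user WHERE ", true)).1 ++ ";" =
    "SELECT * FROM users_user WHERE " ++ pvBuild vd ++ ";"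
  rw [pvFold_true, pvBuild_eq_pvJ]
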